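-- pv_equiv track=rewrite | github.com/kadamsahil2511/GDG-Hackathon | AI-Agent/GoogleSearchAgent.py | classify_result_type
-- ===== SOURCE A (Python) =====
-- def classify_result_type(result):
--     """
--     Classify the type of search result based on URL and content
--     """
--     url = result.get('url', '').lower()
--     title = result.get('title', '').lower()
--
--     if any(domain in url for domain in ['wikipedia.org', 'britannica.com']):
--         return 'reference'
--     elif any(domain in url for domain in ['youtube.com', 'youtu.be']):
--         return 'video'
--     elif any(domain in url for domain in ['reddit.com', 'stackoverflow.com']):
--         return 'discussion'
--     elif any(domain in url for domain in ['.edu', 'scholar.google']):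
--         return 'academic'
--     elif any(domain in url for domain in ['.gov', '.org']):
--         return 'official'
--     elif any(word in title for word in ['news', 'breaking', 'report']):
--         return 'news'
--     else:
--         return 'general'
-- ===== SOURCE B (Python) =====
-- LABELS = ['reference', 'video', 'discussion', 'academic', 'official', 'news']
--
-- # flat pattern list: (substring, field index 0=url/1=title, priority = index into LABELS)
-- PATTERNS = [
--     ('wikipedia.org', 0, 0), ('britannica.com', 0, 0),
--     ('youtube.com', 0, 1), ('youtu.be', 0, 1),
--     ('reddit.com', 0, 2), ('stackoverflow.com', 0, 2),
--     ('.edu', 0, 3), ('scholar.google', 0, 3),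
--     ('.gov', 0, 4), ('.org', 0, 4),
--     ('news', 1, 5), ('breaking', 1, 5), ('report', 1, 5),
-- ]
--
--
-- def classify_result_type(result):
--     texts = (result.get('url', '').lower(), result.get('title', '').lower())
--     hits = [prio for sub, field, prio in PATTERNS if sub in texts[field]]
--     best = min(hits, default=None)
--     return 'general' if best is None else LABELS[best]
-- ===== Notes on version B (the rewrite author's own statement) =====
-- stated objective: alternative
-- what changed: Instead of an early-return elif chain of grouped any() tests, B scans one flat pattern list completely, collects the priorities of ALL matching patterns, and returns the label of the minimum priority (or 'general' if none matched); correct because priorities follow A's branch order.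
import Mathlib
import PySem

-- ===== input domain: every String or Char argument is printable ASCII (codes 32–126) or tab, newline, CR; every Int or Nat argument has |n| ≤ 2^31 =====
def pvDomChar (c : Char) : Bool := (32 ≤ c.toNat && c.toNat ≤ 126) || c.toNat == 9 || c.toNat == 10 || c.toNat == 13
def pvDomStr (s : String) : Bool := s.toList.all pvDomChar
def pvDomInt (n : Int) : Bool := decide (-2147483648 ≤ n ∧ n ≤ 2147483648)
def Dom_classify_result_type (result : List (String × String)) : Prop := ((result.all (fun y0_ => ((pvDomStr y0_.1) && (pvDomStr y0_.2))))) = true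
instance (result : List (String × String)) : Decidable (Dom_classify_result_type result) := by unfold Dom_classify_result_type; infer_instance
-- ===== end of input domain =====

-- B replaces the early-return elif chain by a full scan of a flat pattern list: it collects
-- the priorities of all matching patterns and returns the label of the minimum priority (objective: alternative).

-- ===== PORT A =====
def classify_result_type (result : List (String × String)) : String :=
  let url := PySem.Str.lower ((PySem.Dict.mk result).getD "url" "")
  let title := PySem.Str.lower ((PySem.Dict.mk result).getD "title" "")
  if ["wikipedia.org", "britannica.com"].any (fun domain => PySem.Str.isIn domain url) then "reference"
  else if ["youtube.com", "youtu.be"].any (fun domain => PySem.Str.isIn domain url) then "video"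
  else if ["reddit.com", "stackoverflow.com"].any (fun domain => PySem.Str.isIn domain url) then "discussion"
  else if [".edu", "scholar.google"].any (fun domain => PySem.Str.isIn domain url) then "academic"
  else if [".gov", ".org"].any (fun domain => PySem.Str.isIn domain url) then "official"
  else if ["news", "breaking", "report"].any (fun word => PySem.Str.isIn word title) then "news"
  else "general"

-- ===== PORT B =====
def pvLabels : List String := ["reference", "video", "discussion", "academic", "official", "news"]

-- flat pattern list: (substring, field index 0=url/1=title, priority = index into pvLabels)
def pvPatterns : List (String × Nat × Nat) :=
  [ ("wikipedia.org", 0, 0), ("britannica.com", 0, 0),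
    ("youtube.com", 0, 1), ("youtu.be", 0, 1),
    ("reddit.com", 0, 2), ("stackoverflow.com", 0, 2),
    (".edu", 0, 3), ("scholar.google", 0, 3),
    (".gov", 0, 4), (".org", 0, 4),
    ("news", 1, 5), ("breaking", 1, 5), ("report", 1, 5) ]

-- "'general' if best is None else LABELS[best]"; LABELS[best] ported as getD is exact here
-- since every priority in pvPatterns is < pvLabels.length
def pvPick (best : Option Nat) : String :=
  match best with
  | none => "general"
  | some k => pvLabels.getD k "general"

def classify_result_type_alt (result : List (String × String)) : String :=
  let texts : String × String :=
    (PySem.Str.lower ((PySem.Dict.mk result).getD "url" ""),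
     PySem.Str.lower ((PySem.Dict.mk result).getD "title" ""))
  -- list comprehension over PATTERNS with filter: "sub in texts[field]" with field ∈ {0,1}
  let hits : List Nat :=
    pvPatterns.filterMap (fun p =>
      if PySem.Str.isIn p.1 (if p.2.1 = 0 then texts.1 else texts.2) then some p.2.2 else none)
  pvPick (PySem.List.min? hits (fun x => x))

-- ===== PRECONDITION & SPEC =====
def Spec_classify_result_type (result : List (String × String)) (out : String) : Prop := out = classify_result_type_alt result
instance (result : List (String × String)) (out : String) : Decidable (Spec_classify_result_type result out) := by unfold Spec_classify_result_type; infer_instance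

-- ===== CLAIM (what is proved, stated in full; the proofs are below) =====
def Claim_equal_classify_result_type : Prop := ∀ (result : List (String × String)), Dom_classify_result_type result → Spec_classify_result_type result (classify_result_type result)

-- ===== LEMMAS AND PROOFS =====

lemma pvFilterMap_guard {α β : Type} (c : α → Bool) (g : α → β) (l : List α) :
    l.filterMap (fun p => if c p then some (g p) else none) = (l.filter c).map g := by
  induction l with
  | nil => rfl
  | cons a t ih => cases h : c a <;> simp [h, ih]

lemma pvFoldlMin_left (x : Nat) (l : List Nat) (h : ∀ y ∈ l, x ≤ y) : l.foldl min x = x := by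
  induction l generalizing x with
  | nil => rfl
  | cons a t ih =>
    simp only [List.foldl_cons]
    rw [min_eq_left (h a (by simp))]
    exact ih x (fun y hy => h y (by simp [hy]))

lemma pvMin?_sorted (l : List Nat) (h : l.Pairwise (· ≤ ·)) :
    PySem.List.min? l (fun x => x) = l.head? := by
  cases l with
  | nil => rfl
  | cons a t =>
    rw [PySem.List.min?_id_cons, List.head?_cons, pvFoldlMin_left a t (List.pairwise_cons.mp h).1]

lemma classify_key (url title : String) :
    (if ["wikipedia.org", "britannica.com"].any (fun domain => PySem.Str.isIn domain url) then "reference"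
     else if ["youtube.com", "youtu.be"].any (fun domain => PySem.Str.isIn domain url) then "video"
     else if ["reddit.com", "stackoverflow.com"].any (fun domain => PySem.Str.isIn domain url) then "discussion"
     else if [".edu", "scholar.google"].any (fun domain => PySem.Str.isIn domain url) then "academic"
     else if [".gov", ".org"].any (fun domain => PySem.Str.isIn domain url) then "official"
     else if ["news", "breaking", "report"].any (fun word => PySem.Str.isIn word title) then "news"
     else "general") =
    pvPick (PySem.List.min?
      (pvPatterns.filterMap (fun p =>
        if PySem.Str.isIn p.1 (if p.2.1 = 0 then url else title) then some p.2.2 else none))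
      (fun x => x)) := by
  rw [pvFilterMap_guard (fun p => PySem.Str.isIn p.1 (if p.2.1 = 0 then url else title))
        (fun p => p.2.2) pvPatterns]
  have hpw : ((pvPatterns.filter
      (fun p => PySem.Str.isIn p.1 (if p.2.1 = 0 then url else title))).map
      (fun p => p.2.2)).Pairwise (· ≤ ·) := by
    refine List.Pairwise.sublist (List.Sublist.map _ List.filter_sublist) ?_
    decide
  rw [pvMin?_sorted _ hpw]
  simp only [List.any_cons, List.any_nil, Bool.or_false]
  by_cases h1 : PySem.Str.isIn "wikipedia.org" url = true
  · simp at h1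
    simp [pvPatterns, pvPick, pvLabels, h1]
  by_cases h2 : PySem.Str.isIn "britannica.com" url = true
  · simp at h1 h2
    simp [pvPatterns, pvPick, pvLabels, h1, h2]
  by_cases h3 : PySem.Str.isIn "youtube.com" url = true
  · simp at h1 h2 h3
    simp [pvPatterns, pvPick, pvLabels, h1, h2, h3]
  by_cases h4 : PySem.Str.isIn "youtu.be" url = true
  · simp at h1 h2 h3 h4
    simp [pvPatterns, pvPick, pvLabels, h1, h2, h3, h4]
  by_cases h5 : PySem.Str.isIn "reddit.com" url = true
  · simp at h1 h2 h3 h4 h5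
    simp [pvPatterns, pvPick, pvLabels, h1, h2, h3, h4, h5]
  by_cases h6 : PySem.Str.isIn "stackoverflow.com" url = true
  · simp at h1 h2 h3 h4 h5 h6
    simp [pvPatterns, pvPick, pvLabels, h1, h2, h3, h4, h5, h6]
  by_cases h7 : PySem.Str.isIn ".edu" url = true
  · simp at h1 h2 h3 h4 h5 h6 h7
    simp [pvPatterns, pvPick, pvLabels, h1, h2, h3, h4, h5, h6, h7]
  by_cases h8 : PySem.Str.isIn "scholar.google" url = true
  · simp at h1 h2 h3 h4 h5 h6 h7 h8
    simp [pvPatterns, pvPick, pvLabels, h1, h2, h3, h4, h5, h6, h7, h8]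
  by_cases h9 : PySem.Str.isIn ".gov" url = true
  · simp at h1 h2 h3 h4 h5 h6 h7 h8 h9
    simp [pvPatterns, pvPick, pvLabels, h1, h2, h3, h4, h5, h6, h7, h8, h9]
  by_cases h10 : PySem.Str.isIn ".org" url = true
  · simp at h1 h2 h3 h4 h5 h6 h7 h8 h9 h10
    simp [pvPatterns, pvPick, pvLabels, h1, h2, h3, h4, h5, h6, h7, h8, h9, h10]
  by_cases h11 : PySem.Str.isIn "news" title = true
  · simp at h1 h2 h3 h4 h5 h6 h7 h8 h9 h10 h11
    simp [pvPatterns, pvPick, pvLabels, h1, h2, h3, h4, h5, h6, h7, h8, h9, h10, h11]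
  by_cases h12 : PySem.Str.isIn "breaking" title = true
  · simp at h1 h2 h3 h4 h5 h6 h7 h8 h9 h10 h11 h12
    simp [pvPatterns, pvPick, pvLabels, h1, h2, h3, h4, h5, h6, h7, h8, h9, h10, h11, h12]
  by_cases h13 : PySem.Str.isIn "report" title = true
  · simp at h1 h2 h3 h4 h5 h6 h7 h8 h9 h10 h11 h12 h13
    simp [pvPatterns, pvPick, pvLabels, h1, h2, h3, h4, h5, h6, h7, h8, h9, h10, h11, h12, h13]
  simp at h1 h2 h3 h4 h5 h6 h7 h8 h9 h10 h11 h12 h13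
  simp [pvPatterns, pvPick, h1, h2, h3, h4, h5, h6, h7, h8, h9, h10, h11, h12, h13]
-- ===== VERDICT (by name: the statement is the Claim_ definition above) =====
theorem classify_result_type_spec : Claim_equal_classify_result_type := by
  intro result _
  exact classify_key (PySem.Str.lower ((PySem.Dict.mk result).getD "url" ""))
    (PySem.Str.lower ((PySem.Dict.mk result).getD "title" ""))
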